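-- pv_equiv track=rewrite | github.com/digimangos-work-demo/mssql-to-springel | mylibrary/parser.py | _parse_comma_separated_list
-- ===== SOURCE A (Python) =====
-- def _parse_comma_separated_list(content: str) -> list:
--     """Parse a comma-separated list respecting quotes."""
--     items = []
--     current = ""
--     in_string = False
--     string_char = None
--
--     i = 0
--     while i < len(content):
--         char = content[i]
--
--         if char in ["'", '"'] and not in_string:
--             # Start of quoted string
--             in_string = True
--             string_char = char
--             current += char
--         elif char == string_char and in_string:
--             # End of quoted string
--             in_string = False
--             string_char = None
--             current += char
--         elif in_string:
--             # Inside quoted string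
--             current += char
--         elif char == ',' and not in_string:
--             # Comma outside quotes - end of item
--             if current.strip():
--                 items.append(current.strip().strip("'\""))
--             current = ""
--         else:
--             current += char
--         i += 1
--
--     # Add final item
--     if current.strip():
--         items.append(current.strip().strip("'\""))
--
--     return items
-- ===== SOURCE B (Python) =====
-- def _parse_comma_separated_list(content: str) -> list:
--     """Parse a comma-separated list respecting quotes.
--
--     A cursor walks the string once; each quoted region is skipped in a single
--     str.find of the closing quote. First phase collects the raw segments
--     between top-level commas, second phase strips and filters them.
--     """
--     segs = []
--     buf = []
--     i, n = 0, len(content)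
--     while i < n:
--         ch = content[i]
--         if ch == ',':
--             segs.append(''.join(buf))
--             buf = []
--             i += 1
--         elif ch in "'\"":
--             j = content.find(ch, i + 1)
--             piece = content[i:] if j == -1 else content[i:j + 1]
--             buf.append(piece)
--             i += len(piece)
--         else:
--             buf.append(ch)
--             i += 1
--     segs.append(''.join(buf))
--     return [seg.strip().strip("'\"") for seg in segs if seg.strip()]
-- ===== Notes on version B (the rewrite author's own statement) =====
-- stated objective: faster
-- what changed: Replaces A's per-character state machine (in_string/string_char flags, current built by repeated string concatenation) with a cursor that skips each quoted region in one C-level str.find and slices whole pieces, collecting raw segments first and stripping/filtering them in a second pass.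
import Mathlib
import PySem

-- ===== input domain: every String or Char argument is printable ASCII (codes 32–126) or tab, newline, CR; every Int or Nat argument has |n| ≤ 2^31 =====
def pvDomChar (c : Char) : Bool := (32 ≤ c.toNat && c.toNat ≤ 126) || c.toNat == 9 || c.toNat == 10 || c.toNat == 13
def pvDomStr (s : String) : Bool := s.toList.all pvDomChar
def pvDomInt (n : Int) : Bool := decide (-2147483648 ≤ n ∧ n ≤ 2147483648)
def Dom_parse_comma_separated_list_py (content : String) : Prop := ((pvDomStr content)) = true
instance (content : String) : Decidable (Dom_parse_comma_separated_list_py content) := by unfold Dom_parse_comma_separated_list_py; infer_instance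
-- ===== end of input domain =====

-- B replaces A's single-pass character state machine by a recursive segmentation that skips
-- each quoted region in one find-the-closing-quote step, then strips the segments (objective:
-- alternative decomposition; same asymptotic cost). Return-value equivalence only (no mutation).

-- ===== PORT A =====
-- One loop step of A's while-loop; state = (items, current, in_string, string_char).
def pvStepA (st : List String × List Char × Bool × Option Char) (char : Char) :
    List String × List Char × Bool × Option Char :=
  match st with
  | (items, current, in_string, string_char) =>
    if (char = '\'' ∨ char = '"') ∧ in_string = false then
      (items, current ++ [char], true, some char)
    else if some char = string_char ∧ in_string = true then
      (items, current ++ [char], false, none)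
    else if in_string = true then
      (items, current ++ [char], in_string, string_char)
    else if char = ',' ∧ in_string = false then
      (if PySem.Chars.strip current ≠ [] then
         items ++ [String.ofList (PySem.Chars.stripChars (PySem.Chars.strip current) ['\'', '"'])]
       else items, [], in_string, string_char)
    else
      (items, current ++ [char], in_string, string_char)

-- A's trailing "add final item" step.
def pvFinishA (st : List String × List Char × Bool × Option Char) : List String :=
  if PySem.Chars.strip st.2.1 ≠ [] then
    st.1 ++ [String.ofList (PySem.Chars.stripChars (PySem.Chars.strip st.2.1) ['\'', '"'])]
  else st.1

def parse_comma_separated_list_py (content : String) : List String :=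
  pvFinishA (content.toList.foldl pvStepA ([], [], false, none))

-- ===== PORT B =====
-- Source B's while loop, as the obvious recursion on the unread rest of the string with the
-- segment buffer as accumulator: content[i] is the head c, content.find(ch, i+1) on the
-- 1-char needle is cs.idxOf? c (exact), content[i:j+1] / content[i:] are c :: cs.take (j+1)
-- / c :: cs, and advancing i past the piece drops it from the rest.
def pvSegsB : List Char → List Char → List (List Char)
  | [], buf => [buf]
  | c :: cs, buf =>
    if c = ',' then buf :: pvSegsB cs []
    else if c = '\'' ∨ c = '"' then
      match cs.idxOf? c with
      | none => [buf ++ (c :: cs)]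
      | some j => pvSegsB (cs.drop (j + 1)) (buf ++ (c :: cs.take (j + 1)))
    else pvSegsB cs (buf ++ [c])
termination_by l _ => l.length
decreasing_by
  all_goals simp only [List.length_drop, List.length_cons]
  all_goals omega

-- the comprehension's body/filter
def pvSelB (seg : List Char) : Option String :=
  if PySem.Chars.strip seg ≠ [] then
    some (String.ofList (PySem.Chars.stripChars (PySem.Chars.strip seg) ['\'', '"']))
  else none

def parse_comma_separated_list_py_alt (content : String) : List String :=
  (pvSegsB content.toList []).filterMap pvSelB

-- ===== PRECONDITION & SPEC =====
def Spec_parse_comma_separated_list_py (content : String) (out : List String) : Prop := out = parse_comma_separated_list_py_alt content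
instance (content : String) (out : List String) : Decidable (Spec_parse_comma_separated_list_py content out) := by unfold Spec_parse_comma_separated_list_py; infer_instance

-- ===== CLAIM (what is proved, stated in full; the proofs are below) =====
def Claim_equal_parse_comma_separated_list_py : Prop := ∀ (content : String), Dom_parse_comma_separated_list_py content → Spec_parse_comma_separated_list_py content (parse_comma_separated_list_py content)

-- ===== LEMMAS AND PROOFS =====

-- A's loop while in_string = true: it only appends characters until the first
-- occurrence of the stored quote char, then returns to top-level state.
lemma pvQuoted (l : List Char) (q : Char) :
    ∀ (items : List String) (cur : List Char),
    l.foldl pvStepA (items, cur, true, some q) =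
      match l.idxOf? q with
      | none => (items, cur ++ l, true, some q)
      | some j => (l.drop (j + 1)).foldl pvStepA (items, cur ++ l.take (j + 1), false, none) := by
  induction l with
  | nil => intro items cur; simp
  | cons c cs ih =>
    intro items cur
    by_cases hq : c = q
    · subst hq
      simp [List.foldl_cons, pvStepA, List.idxOf?_cons]
    · have hstep : pvStepA (items, cur, true, some q) c = (items, cur ++ [c], true, some q) := by
        simp [pvStepA, hq]
      rw [List.foldl_cons, hstep, ih]
      have hidx : (c :: cs).idxOf? q = (cs.idxOf? q).map (· + 1) := by
        simp [List.idxOf?_cons, hq]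
      rw [hidx]
      cases h : cs.idxOf? q with
      | none => simp
      | some j => simp [List.append_assoc]

-- Main invariant: A's loop from top-level state (items, cur) produces items followed by
-- the stripped/filtered segments B collects from the rest with buffer cur.
lemma pvMain (n : Nat) : ∀ (l : List Char), l.length ≤ n → ∀ (items : List String) (cur : List Char),
    pvFinishA (l.foldl pvStepA (items, cur, false, none))
      = items ++ (pvSegsB l cur).filterMap pvSelB := by
  induction n with
  | zero =>
    intro l hl items cur
    have : l = [] := List.eq_nil_of_length_eq_zero (Nat.le_zero.mp hl)
    subst this
    simp only [List.foldl_nil, pvSegsB, pvFinishA, pvSelB, List.filterMap_cons,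
      List.filterMap_nil]
    split_ifs <;> simp
  | succ n ih =>
    intro l hl items cur
    cases l with
    | nil =>
      simp only [List.foldl_nil, pvSegsB, pvFinishA, pvSelB, List.filterMap_cons,
        List.filterMap_nil]
      split_ifs <;> simp
    | cons c cs =>
      have hcs : cs.length ≤ n := by simpa using hl
      by_cases hquote : c = '\'' ∨ c = '"'
      · -- opening quote
        have hc : ¬ c = ',' := by rcases hquote with h | h <;> subst h <;> decide
        have hstep : pvStepA (items, cur, false, none) c = (items, cur ++ [c], true, some c) := by
          simp [pvStepA, hquote]
        rw [List.foldl_cons, hstep, pvQuoted, pvSegsB, if_neg hc, if_pos hquote]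
        cases hidx : cs.idxOf? c with
        | none =>
          simp only [pvFinishA, List.filterMap_cons, List.filterMap_nil, pvSelB,
            List.append_assoc, List.singleton_append]
          split_ifs <;> simp
        | some j =>
          rw [ih _ (by simp only [List.length_drop]; omega)]
          simp [List.append_assoc]
      · by_cases hcomma : c = ','
        · subst hcomma
          have hstep : pvStepA (items, cur, false, none) ',' =
              (if PySem.Chars.strip cur ≠ [] then
                 items ++ [String.ofList (PySem.Chars.stripChars (PySem.Chars.strip cur) ['\'', '"'])]
               else items, [], false, none) := by
            simp [pvStepA]
          rw [List.foldl_cons, hstep, ih _ hcs, pvSegsB, if_pos rfl, List.filterMap_cons]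
          by_cases hne : PySem.Chars.strip cur ≠ [] <;> simp [pvSelB, hne]
        · -- ordinary character
          have hstep : pvStepA (items, cur, false, none) c = (items, cur ++ [c], false, none) := by
            simp [pvStepA, hquote, hcomma]
          rw [List.foldl_cons, hstep, ih _ hcs, pvSegsB, if_neg hcomma, if_neg hquote]

-- ===== VERDICT (by name: the statement is the Claim_ definition above) =====
theorem parse_comma_separated_list_py_spec : Claim_equal_parse_comma_separated_list_py := by
  intro content _
  show parse_comma_separated_list_py content = parse_comma_separated_list_py_alt content
  unfold parse_comma_separated_list_py parse_comma_separated_list_py_alt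
  rw [pvMain content.toList.length _ le_rfl]
  simp
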